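-- pv_equiv track=rewrite | github.com/tetras92/MOMA | CORE/ITOR_XP/XP-General-m7-8.py | check_int_List_1
-- ===== SOURCE A (Python) =====
-- m = 8
--
-- def check_int_List_1(int_List):
--     A_binary_encoding_list = [integer_to_bin(val_int) for val_int in int_List]
--     """significativite des m criteres"""
--     for i in range(m):
--         if all([alt[i] == '0' for alt in A_binary_encoding_list]) or all(
--                 [alt[i] == '1' for alt in A_binary_encoding_list]):
--             return False
--
--     return True
--
-- def integer_to_bin(val_int):
--     return format(val_int, "b").zfill(m)
-- ===== SOURCE B (Python) =====
-- m = 8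
--
-- def integer_to_bin(val_int):
--     return format(val_int, "b").zfill(m)
--
-- def check_int_List_1(int_List):
--     all0 = [True] * m
--     all1 = [True] * m
--     for v in int_List:
--         s = integer_to_bin(v)
--         all0 = [all0[i] and s[i] == '0' for i in range(m)]
--         all1 = [all1[i] and s[i] == '1' for i in range(m)]
--     for i in range(m):
--         if all0[i] or all1[i]:
--             return False
--     return True
-- ===== Notes on version B (the rewrite author's own statement) =====
-- stated objective: alternative
-- what changed: Replaces the per-position loop that rescans a precomputed encoding table (via all()) by a single accumulating pass over int_List maintaining all0/all1 flag vectors, followed by one scan of the 8 flags; no table is materialised.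
import Mathlib
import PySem

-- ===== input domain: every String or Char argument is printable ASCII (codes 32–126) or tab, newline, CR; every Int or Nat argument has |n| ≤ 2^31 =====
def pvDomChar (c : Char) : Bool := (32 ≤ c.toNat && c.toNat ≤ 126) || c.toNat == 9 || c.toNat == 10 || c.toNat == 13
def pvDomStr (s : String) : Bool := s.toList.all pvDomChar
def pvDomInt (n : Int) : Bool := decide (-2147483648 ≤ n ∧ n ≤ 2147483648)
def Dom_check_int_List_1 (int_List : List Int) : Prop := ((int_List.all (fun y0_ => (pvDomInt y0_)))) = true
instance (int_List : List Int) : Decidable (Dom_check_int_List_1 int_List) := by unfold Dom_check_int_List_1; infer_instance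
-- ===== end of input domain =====

-- B replaces A's per-position rescans of a precomputed encoding table by one accumulating
-- pass over int_List maintaining all0/all1 flag vectors (alternative decomposition, same cost).

-- ===== PORT A =====
-- binary digits of a positive natural, most significant first (helper for format(v, "b"))
def binNat : Nat → List Char
  | 0 => []
  | n+1 => binNat ((n+1)/2) ++ [if (n+1) % 2 == 1 then '1' else '0']
decreasing_by exact Nat.div_lt_self (Nat.succ_pos n) (by omega)

-- format(val_int, "b"): sign, then binary digits; "0" for zero (exact on all Int)
def formatB (v : Int) : List Char :=
  if v = 0 then ['0']
  else if v < 0 then '-' :: binNat (-v).toNat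
  else binNat v.toNat

-- str.zfill(8): pad with '0' to width 8, after a leading sign (exact: formatB never yields '+')
def zfill8 (cs : List Char) : List Char :=
  match cs with
  | '-' :: rest => '-' :: (List.replicate (8 - (rest.length + 1)) '0' ++ rest)
  | _ => List.replicate (8 - cs.length) '0' ++ cs

def integer_to_bin (val_int : Int) : List Char := zfill8 (formatB val_int)

-- the for-i-in-range(m) loop with its two all() scans and early return False
def aLoop (enc : List (List Char)) : List Nat → Bool
  | [] => true
  | i :: is =>
      if (enc.all fun alt => alt.getD i '?' == '0') || (enc.all fun alt => alt.getD i '?' == '1')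
      then false else aLoop enc is

-- alt[i] is ported as getD (always in range: integer_to_bin yields at least 8 chars)
def check_int_List_1 (int_List : List Int) : Bool :=
  aLoop (int_List.map integer_to_bin) (List.range 8)

-- ===== PORT B =====
-- one step of B's single pass: shrink the all0/all1 flag vectors with value v's encoding
def bStep (p : List Bool × List Bool) (v : Int) : List Bool × List Bool :=
  let s := integer_to_bin v
  ((List.range 8).map fun i => p.1.getD i true && (s.getD i '?' == '0'),
   (List.range 8).map fun i => p.2.getD i true && (s.getD i '?' == '1'))

-- B's final scan of the 8 flags with early return False
def bCheck (all0 all1 : List Bool) : List Nat → Bool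
  | [] => true
  | i :: is => if all0.getD i true || all1.getD i true then false else bCheck all0 all1 is

def check_int_List_1_alt (int_List : List Int) : Bool :=
  let p := int_List.foldl bStep (List.replicate 8 true, List.replicate 8 true)
  bCheck p.1 p.2 (List.range 8)

-- ===== PRECONDITION & SPEC =====
def Spec_check_int_List_1 (int_List : List Int) (out : Bool) : Prop := out = check_int_List_1_alt int_List
instance (int_List : List Int) (out : Bool) : Decidable (Spec_check_int_List_1 int_List out) := by unfold Spec_check_int_List_1; infer_instance

-- ===== CLAIM (what is proved, stated in full; the proofs are below) =====
def Claim_equal_check_int_List_1 : Prop := ∀ (int_List : List Int), Dom_check_int_List_1 int_List → Spec_check_int_List_1 int_List (check_int_List_1 int_List)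

-- ===== LEMMAS AND PROOFS =====

theorem aLoop_eq_all (enc : List (List Char)) (is : List Nat) :
    aLoop enc is = is.all fun i =>
      !((enc.all fun alt => alt.getD i '?' == '0') || (enc.all fun alt => alt.getD i '?' == '1')) := by
  induction is with
  | nil => rfl
  | cons i is ih =>
    simp only [aLoop, List.all_cons, ih]
    split_ifs with h
    · rw [h]; rfl
    · rw [Bool.eq_false_iff.mpr h]; rfl

theorem bCheck_eq_all (a0 a1 : List Bool) (is : List Nat) :
    bCheck a0 a1 is = is.all fun i => !(a0.getD i true || a1.getD i true) := by
  induction is with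
  | nil => rfl
  | cons i is ih =>
    simp only [bCheck, List.all_cons, ih]
    split_ifs with h
    · rw [h]; rfl
    · rw [Bool.eq_false_iff.mpr h]; rfl

theorem all_congr_mem {α : Type} (l : List α) (f g : α → Bool)
    (h : ∀ x ∈ l, f x = g x) : l.all f = l.all g := by
  induction l with
  | nil => rfl
  | cons x l ih =>
    simp only [List.all_cons, h x (List.mem_cons_self), ih fun y hy => h y (List.mem_cons_of_mem x hy)]

theorem getD_map_range {α : Type} (f : Nat → α) (n i : Nat) (d : α) (h : i < n) :
    ((List.range n).map f).getD i d = f i := by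
  simp [List.getD_eq_getElem?_getD, h]

theorem fold_inv (l : List Int) (p : List Bool × List Bool) (i : Nat) (h : i < 8) :
    ((l.foldl bStep p).1.getD i true
       = (p.1.getD i true && l.all fun v => (integer_to_bin v).getD i '?' == '0'))
    ∧ ((l.foldl bStep p).2.getD i true
       = (p.2.getD i true && l.all fun v => (integer_to_bin v).getD i '?' == '1')) := by
  induction l generalizing p with
  | nil => simp
  | cons v l ih =>
    have := ih (bStep p v)
    simp only [List.foldl_cons, this, List.all_cons]
    constructor
    · rw [show (bStep p v).1 = (List.range 8).map
          (fun i => p.1.getD i true && ((integer_to_bin v).getD i '?' == '0')) from rfl,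
        getD_map_range _ _ _ _ h, Bool.and_assoc]
    · rw [show (bStep p v).2 = (List.range 8).map
          (fun i => p.2.getD i true && ((integer_to_bin v).getD i '?' == '1')) from rfl,
        getD_map_range _ _ _ _ h, Bool.and_assoc]

-- ===== VERDICT (by name: the statement is the Claim_ definition above) =====
theorem check_int_List_1_spec : Claim_equal_check_int_List_1 := by
  intro l _
  unfold Spec_check_int_List_1 check_int_List_1 check_int_List_1_alt
  rw [aLoop_eq_all, bCheck_eq_all]
  apply all_congr_mem
  intro i hi
  have h8 : i < 8 := List.mem_range.mp hi
  have hinv := fold_inv l (List.replicate 8 true, List.replicate 8 true) i h8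
  rw [hinv.1, hinv.2]
  have hrep : (List.replicate 8 true).getD i true = true := by
    rw [List.getD_eq_getElem?_getD, List.getElem?_replicate]
    simp [h8]
  simp only [hrep, Bool.true_and, List.all_map, Function.comp_def, Bool.not_or]
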